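-- pv_equiv track=rewrite | github.com/MdAbedin/binarysearch | 1001 - 1100/1020 Blocked Pipeline.py | solve
-- ===== SOURCE A (Python) =====
-- def solve(n, requests):
--     blocks = set()
--     problems = set()
--     ans = 0
--
--     for r,c,t in requests:
--         if t == 1:
--             blocks.add((r,c))
--
--             for r2,c2 in [(1-r,c+1),(1-r,c-1),(1-r,c)]:
--                 if (r2,c2) in blocks:
--                     problems.add(tuple(sorted(map(tuple,[[r,c],[r2,c2]]))))
--
--             if not problems: ans += 1
--         else:
--             blocks.discard((r,c))
--
--             for r2,c2 in [(1-r,c+1),(1-r,c-1),(1-r,c)]: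
--                 if (r2,c2) in blocks:
--                     problems.discard(tuple(sorted(map(tuple,[[r,c],[r2,c2]]))))
--
--             if not problems: ans += 1
--
--     return ans
-- ===== SOURCE B (Python) =====
-- def solve(n, requests):
--     blocks = set()
--     ans = 0
--     for r, c, t in requests:
--         if t == 1:
--             blocks.add((r, c))
--         else:
--             blocks.discard((r, c))
--         if all((1 - br, bc + d) not in blocks for br, bc in blocks for d in (-1, 0, 1)):
--             ans += 1
--     return ans
-- ===== Notes on version B (the rewrite author's own statement) =====
-- stated objective: simpler
-- what changed: B keeps no conflict state at all: instead of A's incrementally maintained set of canonical conflicting pairs, B stores only the blocked-cell set and after each request re-checks from scratch that no blocked cell has a blocked opposite-row neighbour.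
import Mathlib
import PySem

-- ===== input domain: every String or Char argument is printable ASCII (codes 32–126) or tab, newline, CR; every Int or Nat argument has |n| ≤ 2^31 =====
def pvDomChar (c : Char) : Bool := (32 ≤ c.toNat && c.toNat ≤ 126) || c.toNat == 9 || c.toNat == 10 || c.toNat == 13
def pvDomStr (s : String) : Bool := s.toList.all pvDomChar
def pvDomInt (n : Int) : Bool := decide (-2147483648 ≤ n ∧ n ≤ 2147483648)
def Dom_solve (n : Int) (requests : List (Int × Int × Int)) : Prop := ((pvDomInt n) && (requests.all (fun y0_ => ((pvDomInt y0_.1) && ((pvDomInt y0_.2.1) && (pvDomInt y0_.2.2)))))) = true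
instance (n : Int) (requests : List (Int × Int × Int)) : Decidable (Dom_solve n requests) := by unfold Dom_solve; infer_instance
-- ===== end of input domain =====

-- B drops A's incrementally maintained set of conflicting pairs and instead rescans the
-- blocked-cell set from scratch after every request; objective: simpler (no conflict state).


-- ===== PORT A =====
-- the three opposite-row neighbours [(1-r,c+1),(1-r,c-1),(1-r,c)]
def nbrs (r c : Int) : List (Int × Int) := [(1 - r, c + 1), (1 - r, c - 1), (1 - r, c)]

-- Python tuple '<' on pairs (lexicographic)
def pairLt (a b : Int × Int) : Bool := a.1 < b.1 || (a.1 == b.1 && a.2 < b.2)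

-- tuple(sorted(map(tuple,[[r,c],[r2,c2]]))): stable two-element sort by tuple order
def sortedPair (x y : Int × Int) : (Int × Int) × (Int × Int) :=
  if pairLt y x then (y, x) else (x, y)

def stepA (st : PySem.Set (Int × Int) × PySem.Set ((Int × Int) × (Int × Int)) × Int)
    (req : Int × Int × Int) :
    PySem.Set (Int × Int) × PySem.Set ((Int × Int) × (Int × Int)) × Int :=
  let r := req.1; let c := req.2.1; let t := req.2.2
  let blocks := st.1; let problems := st.2.1; let ans := st.2.2
  if t == 1 then
    let blocks := PySem.Set.add blocks (r, c)
    let problems := (nbrs r c).foldl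
      (fun pr nb => if PySem.Set.contains blocks nb then PySem.Set.add pr (sortedPair (r, c) nb) else pr)
      problems
    (blocks, problems, if problems.isEmpty then ans + 1 else ans)
  else
    let blocks := PySem.Set.discard blocks (r, c)
    let problems := (nbrs r c).foldl
      (fun pr nb => if PySem.Set.contains blocks nb then PySem.Set.discard pr (sortedPair (r, c) nb) else pr)
      problems
    (blocks, problems, if problems.isEmpty then ans + 1 else ans)

def solve (n : Int) (requests : List (Int × Int × Int)) : Int :=
  (requests.foldl stepA (PySem.Set.empty, PySem.Set.empty, 0)).2.2

-- ===== PORT B =====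
-- all((1-br, bc+d) not in blocks for br,bc in blocks for d in (-1,0,1)):
-- order-independent consumption of the set (all), so the List.all over the Set is exact
def unblockedScan (blocks : PySem.Set (Int × Int)) : Bool :=
  blocks.all (fun b =>
    ([-1, 0, 1] : List Int).all (fun d => !(PySem.Set.contains blocks (1 - b.1, b.2 + d))))

def stepB (st : PySem.Set (Int × Int) × Int) (req : Int × Int × Int) :
    PySem.Set (Int × Int) × Int :=
  let r := req.1; let c := req.2.1; let t := req.2.2
  let blocks :=
    if t == 1 then PySem.Set.add st.1 (r, c) else PySem.Set.discard st.1 (r, c)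
  (blocks, if unblockedScan blocks then st.2 + 1 else st.2)

def solve_alt (n : Int) (requests : List (Int × Int × Int)) : Int :=
  (requests.foldl stepB (PySem.Set.empty, 0)).2

-- ===== PRECONDITION & SPEC =====
def Spec_solve (n : Int) (requests : List (Int × Int × Int)) (out : Int) : Prop := out = solve_alt n requests
instance (n : Int) (requests : List (Int × Int × Int)) (out : Int) : Decidable (Spec_solve n requests out) := by unfold Spec_solve; infer_instance

-- ===== CLAIM (what is proved, stated in full; the proofs are below) =====
def Claim_equal_solve : Prop := ∀ (n : Int) (requests : List (Int × Int × Int)), Dom_solve n requests → Spec_solve n requests (solve n requests)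

-- ===== LEMMAS AND PROOFS =====

-- p is a canonical pair of two adjacent blocked cells
def Conf (blocks : List (Int × Int)) (p : (Int × Int) × (Int × Int)) : Prop :=
  ∃ x y, x ∈ blocks ∧ y ∈ blocks ∧ y ∈ nbrs x.1 x.2 ∧ p = sortedPair x y

-- coupling invariant: A's problems set holds exactly the conflict pairs of the blocks set
def CInv (blocks : List (Int × Int)) (problems : List ((Int × Int) × (Int × Int))) : Prop :=
  ∀ p, p ∈ problems ↔ Conf blocks p

lemma ne_of_mem_nbrs {x y : Int × Int} (h : y ∈ nbrs x.1 x.2) : y ≠ x := by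
  rcases x with ⟨r, c⟩; rcases y with ⟨r2, c2⟩
  simp [nbrs, Prod.ext_iff] at h ⊢
  rcases h with ⟨h1, _⟩ | ⟨h1, _⟩ | ⟨h1, _⟩ <;> intro hr <;> omega

lemma nbrs_symm {x y : Int × Int} (h : y ∈ nbrs x.1 x.2) : x ∈ nbrs y.1 y.2 := by
  rcases x with ⟨r, c⟩; rcases y with ⟨r2, c2⟩
  simp [nbrs, Prod.ext_iff] at h ⊢
  rcases h with ⟨h1, h2⟩ | ⟨h1, h2⟩ | ⟨h1, h2⟩ <;> omega

lemma sortedPair_cases (x y : Int × Int) : sortedPair x y = (x, y) ∨ sortedPair x y = (y, x) := by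
  unfold sortedPair; split <;> simp

lemma sortedPair_comm (x y : Int × Int) : sortedPair x y = sortedPair y x := by
  rcases x with ⟨a, b⟩; rcases y with ⟨c, d⟩
  unfold sortedPair pairLt
  simp only [beq_iff_eq, decide_eq_true_eq, Bool.or_eq_true, Bool.and_eq_true]
  split <;> split <;> simp_all [Prod.ext_iff] <;> omega

lemma eq_sortedPair_mem {a b x y : Int × Int} (h : sortedPair a b = sortedPair x y) :
    (x = a ∨ x = b) ∧ (y = a ∨ y = b) := by
  rcases sortedPair_cases a b with h1 | h1 <;> rcases sortedPair_cases x y with h2 | h2 <;>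
    rw [h1, h2] at h <;> injection h with h3 h4 <;> subst h3 <;> subst h4 <;> simp

-- membership after A's type-1 inner loop
lemma addLoop_mem (x : Int × Int) (bl : List (Int × Int)) :
    ∀ (ns : List (Int × Int)) (problems : List ((Int × Int) × (Int × Int)))
      (p : (Int × Int) × (Int × Int)),
    p ∈ ns.foldl (fun pr nb =>
        if PySem.Set.contains bl nb then PySem.Set.add pr (sortedPair x nb) else pr) problems ↔
    p ∈ problems ∨ ∃ nb ∈ ns, nb ∈ bl ∧ p = sortedPair x nb := by
  intro ns
  induction ns with
  | nil => intro problems p; simp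
  | cons nb tl ih =>
    intro problems p
    simp only [List.foldl_cons]
    by_cases hc : PySem.Set.contains bl nb = true
    · rw [if_pos hc, ih, PySem.Set.mem_add]
      have hmem : nb ∈ bl := (PySem.Set.contains_iff bl nb).mp hc
      constructor
      · rintro ((h | h) | ⟨nb', h1, h2, h3⟩)
        · exact Or.inl h
        · exact Or.inr ⟨nb, by simp, hmem, h⟩
        · exact Or.inr ⟨nb', by simp [h1], h2, h3⟩
      · rintro (h | ⟨nb', h1, h2, h3⟩)
        · exact Or.inl (Or.inl h)
        · rcases List.mem_cons.mp h1 with h1 | h1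
          · exact Or.inl (Or.inr (h1 ▸ h3))
          · exact Or.inr ⟨nb', h1, h2, h3⟩
    · rw [if_neg hc, ih]
      constructor
      · rintro (h | ⟨nb', h1, h2, h3⟩)
        · exact Or.inl h
        · exact Or.inr ⟨nb', by simp [h1], h2, h3⟩
      · rintro (h | ⟨nb', h1, h2, h3⟩)
        · exact Or.inl h
        · rcases List.mem_cons.mp h1 with h1 | h1
          · exact absurd ((PySem.Set.contains_iff bl nb').mpr h2) (h1 ▸ hc)
          · exact Or.inr ⟨nb', h1, h2, h3⟩

-- membership after A's type-0 inner loop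
lemma removeLoop_mem (x : Int × Int) (bl : List (Int × Int)) :
    ∀ (ns : List (Int × Int)) (problems : List ((Int × Int) × (Int × Int)))
      (p : (Int × Int) × (Int × Int)),
    p ∈ ns.foldl (fun pr nb =>
        if PySem.Set.contains bl nb then PySem.Set.discard pr (sortedPair x nb) else pr) problems ↔
    p ∈ problems ∧ ∀ nb ∈ ns, nb ∈ bl → p ≠ sortedPair x nb := by
  intro ns
  induction ns with
  | nil => intro problems p; simp
  | cons nb tl ih =>
    intro problems p
    simp only [List.foldl_cons]
    by_cases hc : PySem.Set.contains bl nb = true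
    · rw [if_pos hc, ih]
      have hmem : nb ∈ bl := (PySem.Set.contains_iff bl nb).mp hc
      constructor
      · rintro ⟨h1, h2⟩
        have h1' := (PySem.Set.mem_discard _ _ _).mp h1
        refine ⟨h1'.1, ?_⟩
        intro nb' h3 h4
        rcases List.mem_cons.mp h3 with h3 | h3
        · exact h3 ▸ h1'.2
        · exact h2 nb' h3 h4
      · rintro ⟨h1, h2⟩
        exact ⟨(PySem.Set.mem_discard _ _ _).mpr ⟨h1, h2 nb (by simp) hmem⟩,
          fun nb' h3 h4 => h2 nb' (by simp [h3]) h4⟩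
    · rw [if_neg hc, ih]
      constructor
      · rintro ⟨h1, h2⟩
        refine ⟨h1, ?_⟩
        intro nb' h3 h4
        rcases List.mem_cons.mp h3 with h3 | h3
        · exact absurd ((PySem.Set.contains_iff bl nb').mpr h4) (h3 ▸ hc)
        · exact h2 nb' h3 h4
      · rintro ⟨h1, h2⟩
        exact ⟨h1, fun nb' h3 h4 => h2 nb' (by simp [h3]) h4⟩

-- conflicts after adding a cell
lemma conf_add (blocks : List (Int × Int)) (x : Int × Int) (p : (Int × Int) × (Int × Int)) :
    Conf (PySem.Set.add blocks x) p ↔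
    Conf blocks p ∨ ∃ nb ∈ nbrs x.1 x.2, nb ∈ PySem.Set.add blocks x ∧ p = sortedPair x nb := by
  constructor
  · rintro ⟨a, b, ha, hb, hadj, rfl⟩
    rcases (PySem.Set.mem_add _ _ _).mp ha with ha1 | ha1
    · rcases (PySem.Set.mem_add _ _ _).mp hb with hb1 | hb1
      · exact Or.inl ⟨a, b, ha1, hb1, hadj, rfl⟩
      · subst hb1
        exact Or.inr ⟨a, nbrs_symm hadj, ha, sortedPair_comm a b⟩
    · subst ha1
      exact Or.inr ⟨b, hadj, hb, rfl⟩
  · rintro (⟨a, b, ha, hb, hadj, rfl⟩ | ⟨nb, h1, h2, rfl⟩)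
    · exact ⟨a, b, (PySem.Set.mem_add _ _ _).mpr (Or.inl ha),
        (PySem.Set.mem_add _ _ _).mpr (Or.inl hb), hadj, rfl⟩
    · exact ⟨x, nb, (PySem.Set.mem_add _ _ _).mpr (Or.inr rfl), h2, h1, rfl⟩

-- conflicts after discarding a cell
lemma conf_discard (blocks : List (Int × Int)) (x : Int × Int) (p : (Int × Int) × (Int × Int)) :
    Conf (PySem.Set.discard blocks x) p ↔
    Conf blocks p ∧ ∀ nb ∈ nbrs x.1 x.2, nb ∈ PySem.Set.discard blocks x → p ≠ sortedPair x nb := by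
  constructor
  · rintro ⟨a, b, ha, hb, hadj, rfl⟩
    have ha' := (PySem.Set.mem_discard blocks x a).mp ha
    have hb' := (PySem.Set.mem_discard blocks x b).mp hb
    refine ⟨⟨a, b, ha'.1, hb'.1, hadj, rfl⟩, ?_⟩
    intro nb _ _ he
    rcases (eq_sortedPair_mem he).1 with h | h
    · exact ha'.2 h.symm
    · exact hb'.2 h.symm
  · rintro ⟨⟨a, b, ha, hb, hadj, rfl⟩, h2⟩
    have hbx : b ≠ x := by
      intro hbx
      subst hbx
      have hax : a ≠ b := fun h => (ne_of_mem_nbrs hadj) h.symm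
      have hmem : a ∈ PySem.Set.discard blocks b := (PySem.Set.mem_discard blocks b a).mpr ⟨ha, hax⟩
      exact h2 a (nbrs_symm hadj) hmem (sortedPair_comm a b)
    have hax : a ≠ x := by
      intro hax
      subst hax
      have hbne : b ≠ a := ne_of_mem_nbrs hadj
      have hmem : b ∈ PySem.Set.discard blocks a := (PySem.Set.mem_discard blocks a b).mpr ⟨hb, hbne⟩
      exact h2 b hadj hmem rfl
    exact ⟨a, b, (PySem.Set.mem_discard blocks x a).mpr ⟨ha, hax⟩,
      (PySem.Set.mem_discard blocks x b).mpr ⟨hb, hbx⟩, hadj, rfl⟩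

-- B's rescan is true exactly when no conflict pair exists
lemma unblockedScan_iff (blocks : PySem.Set (Int × Int)) :
    unblockedScan blocks = true ↔ ∀ p, ¬ Conf blocks p := by
  unfold unblockedScan
  simp only [List.all_eq_true, Bool.not_eq_eq_eq_not, Bool.not_true,
    ← Bool.not_eq_true, PySem.Set.contains_iff]
  constructor
  · rintro h p ⟨x, y, hx, hy, hadj, rfl⟩
    rcases x with ⟨r, c⟩; rcases y with ⟨r2, c2⟩
    simp only [nbrs, List.mem_cons, List.not_mem_nil, or_false, Prod.ext_iff] at hadj
    rcases hadj with ⟨h1, h2⟩ | ⟨h1, h2⟩ | ⟨h1, h2⟩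
    · exact h _ hx 1 (by simp) (by subst h1; subst h2; simpa using hy)
    · exact h _ hx (-1) (by simp) (by subst h1; subst h2; simpa using hy)
    · exact h _ hx 0 (by simp) (by subst h1; subst h2; simpa using hy)
  · intro h b hb d hd hmem
    refine h (sortedPair b (1 - b.1, b.2 + d)) ⟨b, (1 - b.1, b.2 + d), hb, hmem, ?_, rfl⟩
    rcases b with ⟨r, c⟩
    simp only [List.mem_cons, List.not_mem_nil, or_false] at hd
    rcases hd with h1 | h1 | h1 <;> subst h1 <;> simp [nbrs, Prod.ext_iff] <;> omega

lemma isEmpty_iff_cinv {blocks : List (Int × Int)}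
    {problems : List ((Int × Int) × (Int × Int))} (hI : CInv blocks problems) :
    problems.isEmpty = unblockedScan blocks := by
  by_cases hs : unblockedScan blocks = true
  · rw [hs, List.isEmpty_iff, List.eq_nil_iff_forall_not_mem]
    intro p hp
    exact (unblockedScan_iff blocks).mp hs p ((hI p).mp hp)
  · rw [Bool.not_eq_true] at hs
    rw [hs, List.isEmpty_eq_false_iff_exists_mem]
    have hs' : ¬ ∀ p, ¬ Conf blocks p := fun h => by
      rw [← unblockedScan_iff blocks] at h; simp [h] at hs
    push_neg at hs'
    obtain ⟨p, hp⟩ := hs'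
    exact ⟨p, (hI p).mpr hp⟩

-- one synchronized step preserves the coupling invariant and answer equality
lemma step_sim (blocks : PySem.Set (Int × Int)) (problems : PySem.Set ((Int × Int) × (Int × Int)))
    (ansA ansB : Int) (req : Int × Int × Int)
    (hI : CInv blocks problems) (hans : ansA = ansB) :
    (stepA (blocks, problems, ansA) req).1 = (stepB (blocks, ansB) req).1 ∧
    CInv (stepA (blocks, problems, ansA) req).1 (stepA (blocks, problems, ansA) req).2.1 ∧
    (stepA (blocks, problems, ansA) req).2.2 = (stepB (blocks, ansB) req).2 := by
  obtain ⟨r, c, t⟩ := req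
  subst hans
  by_cases ht : (t == 1) = true
  · have hI' : CInv (PySem.Set.add blocks (r, c))
        ((nbrs r c).foldl (fun pr nb =>
          if PySem.Set.contains (PySem.Set.add blocks (r, c)) nb then
            PySem.Set.add pr (sortedPair (r, c) nb) else pr) problems) := by
      intro p
      rw [addLoop_mem, conf_add]
      constructor
      · rintro (h | ⟨nb, h1, h2, h3⟩)
        · exact Or.inl ((hI p).mp h)
        · exact Or.inr ⟨nb, h1, h2, h3⟩
      · rintro (h | ⟨nb, h1, h2, h3⟩)
        · exact Or.inl ((hI p).mpr h)
        · exact Or.inr ⟨nb, h1, h2, h3⟩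
    simp only [stepA, stepB, ht, if_true]
    exact ⟨trivial, hI', by rw [isEmpty_iff_cinv hI']⟩
  · have hI' : CInv (PySem.Set.discard blocks (r, c))
        ((nbrs r c).foldl (fun pr nb =>
          if PySem.Set.contains (PySem.Set.discard blocks (r, c)) nb then
            PySem.Set.discard pr (sortedPair (r, c) nb) else pr) problems) := by
      intro p
      rw [removeLoop_mem, conf_discard]
      constructor
      · rintro ⟨h1, h2⟩; exact ⟨(hI p).mp h1, h2⟩
      · rintro ⟨h1, h2⟩; exact ⟨(hI p).mpr h1, h2⟩
    simp only [stepA, stepB, ht, if_false, Bool.false_eq_true]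
    exact ⟨trivial, hI', by rw [isEmpty_iff_cinv hI']⟩

-- folding the whole request list preserves the coupling and yields equal answers
lemma fold_sim : ∀ (reqs : List (Int × Int × Int)) (blocks : PySem.Set (Int × Int))
    (problems : PySem.Set ((Int × Int) × (Int × Int))) (ansA ansB : Int),
    CInv blocks problems → ansA = ansB →
    (reqs.foldl stepA (blocks, problems, ansA)).2.2 = (reqs.foldl stepB (blocks, ansB)).2 := by
  intro reqs
  induction reqs with
  | nil => intro blocks problems ansA ansB _ hans; simpa using hans
  | cons req tl ih =>
    intro blocks problems ansA ansB hI hans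
    obtain ⟨h1, h2, h3⟩ := step_sim blocks problems ansA ansB req hI hans
    simp only [List.foldl_cons]
    have ha : stepA (blocks, problems, ansA) req =
        ((stepA (blocks, problems, ansA) req).1, (stepA (blocks, problems, ansA) req).2.1,
         (stepA (blocks, problems, ansA) req).2.2) := rfl
    have hb : stepB (blocks, ansB) req =
        ((stepB (blocks, ansB) req).1, (stepB (blocks, ansB) req).2) := rfl
    rw [ha, hb, ← h1]
    exact ih _ _ _ _ h2 h3

-- ===== VERDICT (by name: the statement is the Claim_ definition above) =====
theorem solve_spec : Claim_equal_solve := by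
  intro n requests _
  show solve n requests = solve_alt n requests
  unfold solve solve_alt
  exact fold_sim requests PySem.Set.empty PySem.Set.empty 0 0
    (by intro p; simp [Conf, PySem.Set.empty]) rfl
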